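-- pv_equiv track=rewrite | github.com/gridvisi/Python_workspace | brilliant/probability概率/期望值/daily-problems-two-girls-in-a-row.py | inARow
-- ===== SOURCE A (Python) =====
-- def inARow(s,seq,gender):
--     i = 0
--     cunt = 0
--     while i < len(s)-seq:
--         if all([g==gender for g in s[i:i+seq]]):
--             cunt += 1
--         i += 1
--     return cunt
-- ===== SOURCE B (Python) =====
-- def inARow(s, seq, gender):
--     # One pass: keep the length of the current run of gender characters; every
--     # time the run reaches seq, a full all-gender window of length seq ends here.
--     run = 0
--     cnt = 0
--     for ch in s:
--         run = run + 1 if ch == gender else 0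
--         if run >= seq:
--             cnt += 1
--     return cnt
-- ===== Notes on version B (the rewrite author's own statement) =====
-- stated objective: faster
-- what changed: A re-scans an entire slice s[i:i+seq] at every index (building a list of comparisons and calling all); B does a single pass with a run-length counter of consecutive gender characters; Pre_ excludes non-positive seq, outside the function's natural domain, where A's returned count of empty slices (all([]) is True) is an artefact of slicing.
-- intended difference: When 1 <= seq <= len(s) and the final length-seq window of s is all gender, A's loop bound i < len(s)-seq skips that last window and returns one less than the number of all-gender windows; B counts it, which is the intended count. — e.g. on inARow("gg", 1, "g"): A returns 1, B returns 2
-- outside the precondition, e.g. on inARow('ab', -1, 'a'): A returns 3, B returns 2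
import Mathlib
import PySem

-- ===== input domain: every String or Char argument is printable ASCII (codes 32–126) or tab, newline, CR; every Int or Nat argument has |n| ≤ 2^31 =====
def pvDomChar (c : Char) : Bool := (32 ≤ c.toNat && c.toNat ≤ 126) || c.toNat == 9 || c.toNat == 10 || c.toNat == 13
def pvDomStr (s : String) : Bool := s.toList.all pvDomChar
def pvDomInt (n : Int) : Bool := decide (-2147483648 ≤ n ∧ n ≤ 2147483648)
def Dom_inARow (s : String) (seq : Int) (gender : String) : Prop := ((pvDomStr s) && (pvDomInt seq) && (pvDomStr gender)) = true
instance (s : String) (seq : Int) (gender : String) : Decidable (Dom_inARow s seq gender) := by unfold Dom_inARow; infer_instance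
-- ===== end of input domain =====

-- B replaces A's per-index rescan of the whole slice by a single pass with a run-length
-- counter of consecutive gender characters (objective: faster); on the stated D_ corner
-- B also counts the final window that A's loop bound skips.

-- ===== PORT A =====
-- while i < len(s)-seq: if all([g==gender for g in s[i:i+seq]]): cunt += 1; i += 1
def inARow (s : String) (seq : Int) (gender : String) : Int :=
  (PySem.List.pyRange 0 ((s.toList.length : Int) - seq) 1).foldl
    (fun cunt i =>
      if (PySem.List.slice s.toList (some i) (some (i + seq))).all
          (fun g => decide ([g] = gender.toList)) then cunt + 1
      else cunt) 0

-- ===== PORT B =====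
-- for ch in s: run = run+1 if ch == gender else 0; if run >= seq: cnt += 1
def inARow_alt (s : String) (seq : Int) (gender : String) : Int :=
  (s.toList.foldl
    (fun (st : Int × Int) ch =>
      let run : Int := if [ch] = gender.toList then st.1 + 1 else 0
      (run, if seq ≤ run then st.2 + 1 else st.2))
    ((0 : Int), (0 : Int))).2

-- ===== PRECONDITION & SPEC =====
-- character test shared by D_ and the proofs (not by the ports)
def pEq (gender : String) (c : Char) : Bool := decide ([c] = gender.toList)

-- Pre_ excludes non-positive seq, outside the function's natural domain, where A's
-- returned count of empty slices (all([]) is True) is an artefact of slicing.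
def Pre_inARow (s : String) (seq : Int) (gender : String) : Prop := 1 ≤ seq
instance (s : String) (seq : Int) (gender : String) : Decidable (Pre_inARow s seq gender) := by unfold Pre_inARow; infer_instance
def pvWitness_inARow : String × Int × String := ("abc", 2, "a")

-- When 1 ≤ seq ≤ len(s) and the final length-seq window of s is all gender, A's loop
-- bound i < len(s)-seq skips that last window and returns one less than the number of
-- all-gender windows; B counts it, which is the intended count.
def D_inARow (s : String) (seq : Int) (gender : String) : Prop :=
  1 ≤ seq ∧ seq ≤ (s.toList.length : Int) ∧
    (s.toList.drop (s.toList.length - seq.toNat)).all (pEq gender) = true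
instance (s : String) (seq : Int) (gender : String) : Decidable (D_inARow s seq gender) := by unfold D_inARow; infer_instance

def Spec_inARow (s : String) (seq : Int) (gender : String) (out : Int) : Prop :=
  ¬ D_inARow s seq gender → out = inARow_alt s seq gender
instance (s : String) (seq : Int) (gender : String) (out : Int) : Decidable (Spec_inARow s seq gender out) := by unfold Spec_inARow; infer_instance

def pvDiffWitness_inARow : String × Int × String := ("gg", 1, "g")
def pvDiffWitnessOut_inARow : Int × Int := (1, 2)

-- ===== CLAIM (what is proved, stated in full; the proofs are below) =====
def Claim_unchanged_inARow : Prop := ∀ (s : String) (seq : Int) (gender : String), Dom_inARow s seq gender → Pre_inARow s seq gender → Spec_inARow s seq gender (inARow s seq gender)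
def Claim_changed_inARow : Prop := Dom_inARow (pvDiffWitness_inARow.1) (pvDiffWitness_inARow.2.1) (pvDiffWitness_inARow.2.2) ∧ Pre_inARow (pvDiffWitness_inARow.1) (pvDiffWitness_inARow.2.1) (pvDiffWitness_inARow.2.2) ∧ D_inARow (pvDiffWitness_inARow.1) (pvDiffWitness_inARow.2.1) (pvDiffWitness_inARow.2.2) ∧ inARow (pvDiffWitness_inARow.1) (pvDiffWitness_inARow.2.1) (pvDiffWitness_inARow.2.2) = pvDiffWitnessOut_inARow.1 ∧ inARow_alt (pvDiffWitness_inARow.1) (pvDiffWitness_inARow.2.1) (pvDiffWitness_inARow.2.2) = pvDiffWitnessOut_inARow.2 ∧ pvDiffWitnessOut_inARow.1 ≠ pvDiffWitnessOut_inARow.2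
def Claim_exact_inARow : Prop := ∀ (s : String) (seq : Int) (gender : String), Dom_inARow s seq gender → Pre_inARow s seq gender → D_inARow s seq gender → inARow s seq gender ≠ inARow_alt s seq gender

-- ===== LEMMAS AND PROOFS =====

-- length of the maximal all-p suffix
def runLen (p : Char → Bool) (l : List Char) : Nat := (l.reverse.takeWhile p).length

-- number of all-p windows of length Ln starting at j < M
def countW (p : Char → Bool) (cs : List Char) (Ln M : Nat) : Nat :=
  (List.range M).countP (fun j => ((cs.drop j).take Ln).all p)

lemma le_takeWhile_iff (p : Char → Bool) (r : List Char) (Ln : Nat) :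
    Ln ≤ (r.takeWhile p).length ↔ Ln ≤ r.length ∧ (r.take Ln).all p := by
  induction r generalizing Ln with
  | nil => simp
  | cons a t ih =>
    cases Ln with
    | zero => simp
    | succ k =>
      by_cases hp : p a
      · simp [hp, ih]
      · simp [hp]

lemma le_runLen_iff (p : Char → Bool) (m : List Char) (Ln : Nat) :
    Ln ≤ runLen p m ↔ Ln ≤ m.length ∧ ((m.drop (m.length - Ln)).all p) := by
  unfold runLen
  rw [le_takeWhile_iff, List.length_reverse, List.take_reverse, List.all_reverse]

lemma runLen_append (p : Char → Bool) (t : List Char) (c : Char) :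
    runLen p (t ++ [c]) = if p c then runLen p t + 1 else 0 := by
  unfold runLen
  rw [List.reverse_append]
  by_cases hp : p c <;> simp [hp]

-- the fold of inARow_alt computes (run length, count of positions whose run reaches seq)
lemma altFold_eq (gender : String) (L : Int) (cs : List Char) :
    cs.foldl
      (fun (st : Int × Int) ch =>
        let run : Int := if [ch] = gender.toList then st.1 + 1 else 0
        (run, if L ≤ run then st.2 + 1 else st.2))
      ((0 : Int), (0 : Int))
    = ((runLen (pEq gender) cs : Int),
       ((List.range cs.length).countP
         (fun j => decide (L ≤ (runLen (pEq gender) (cs.take (j+1)) : Int))) : Int)) := by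
  induction cs using List.reverseRecOn with
  | nil => simp [runLen]
  | append_singleton t c ih =>
    rw [List.foldl_append, ih]
    have hrun : runLen (pEq gender) (t ++ [c])
        = if [c] = gender.toList then runLen (pEq gender) t + 1 else 0 := by
      rw [runLen_append]
      by_cases h : [c] = gender.toList
      · rw [if_pos h, if_pos (by simpa [pEq] using h)]
      · rw [if_neg h, if_neg (by simpa [pEq] using h)]
    have hrunc : (if [c] = gender.toList then ((runLen (pEq gender) t : Int)) + 1 else 0)
        = ((runLen (pEq gender) (t ++ [c]) : Int)) := by
      rw [hrun]; split_ifs with h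
      · push_cast; ring
      · rfl
    have htake : ∀ j, j < t.length → (t ++ [c]).take (j+1) = t.take (j+1) :=
      fun j hj => List.take_append_of_le_length (by omega)
    have hfull : (t ++ [c]).take (t.length + 1) = t ++ [c] :=
      List.take_of_length_le (by simp)
    have hcongr : (List.range t.length).countP
          (fun j => decide (L ≤ (runLen (pEq gender) ((t ++ [c]).take (j+1)) : Int)))
        = (List.range t.length).countP
          (fun j => decide (L ≤ (runLen (pEq gender) (t.take (j+1)) : Int))) := by
      refine List.countP_congr (fun j hj => ?_)
      rw [List.mem_range] at hj
      rw [htake j hj]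
    rw [List.foldl_cons, List.foldl_nil, List.length_append, List.length_singleton,
      List.range_succ, List.countP_append, hcongr]
    rw [Prod.mk.injEq]
    refine ⟨hrunc, ?_⟩
    have hone : (List.countP
        (fun j => decide (L ≤ (runLen (pEq gender) ((t ++ [c]).take (j+1)) : Int)))
        [t.length])
        = if L ≤ (runLen (pEq gender) (t ++ [c]) : Int) then 1 else 0 := by
      rw [List.countP_cons, List.countP_nil, hfull]
      by_cases hc : L ≤ (runLen (pEq gender) (t ++ [c]) : Int)
      · rw [if_pos hc]; simp [hc]
      · rw [if_neg hc]; simp [hc]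
    rw [hone, ← hrunc]
    by_cases h : [c] = gender.toList
    · rw [if_pos h]
      split_ifs with hc
      · push_cast; ring
      · push_cast; ring
    · rw [if_neg h]
      split_ifs with hc
      · push_cast; ring
      · push_cast; ring

lemma countP_range_shift (f : Nat → Bool) (K d : Nat) :
    (List.range K).countP (fun i => decide (d ≤ i) && f (i - d))
      = (List.range (K - d)).countP f := by
  by_cases h : d ≤ K
  · obtain ⟨e, rfl⟩ : ∃ e, K = d + e := ⟨K - d, by omega⟩
    rw [List.range_add, List.countP_append, List.countP_map]
    have h1 : (List.range d).countP (fun i => decide (d ≤ i) && f (i - d)) = 0 := by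
      rw [List.countP_eq_zero]
      intro i hi
      rw [List.mem_range] at hi
      simp [Nat.not_le.mpr hi]
    have h2 : (List.range e).countP ((fun i => decide (d ≤ i) && f (i - d)) ∘ (fun x => d + x))
        = (List.range e).countP f := by
      refine List.countP_congr (fun j _ => ?_)
      simp
    rw [h1, h2]
    simp
  · have h0 : K - d = 0 := by omega
    rw [h0, List.range_zero, List.countP_nil, List.countP_eq_zero]
    intro i hi
    rw [List.mem_range] at hi
    simp [Nat.not_le.mpr (by omega : i < d)]

-- B evaluates to the count of all-gender windows with starts j < n - (seq-1)
lemma alt_eval (s : String) (seq : Int) (gender : String) (hL : 1 ≤ seq) :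
    inARow_alt s seq gender
      = (countW (pEq gender) s.toList seq.toNat (s.toList.length - (seq.toNat - 1)) : Int) := by
  unfold inARow_alt
  rw [altFold_eq]
  set cs := s.toList
  set Ln := seq.toNat with hLn
  have hLcast : seq = (Ln : Int) := by omega
  have hstep : (List.range cs.length).countP
        (fun j => decide (seq ≤ (runLen (pEq gender) (cs.take (j+1)) : Int)))
      = (List.range cs.length).countP
        (fun j => decide (Ln - 1 ≤ j) &&
          ((fun k => ((cs.drop k).take Ln).all (pEq gender)) (j - (Ln - 1)))) := by
    refine List.countP_congr (fun j hj => ?_)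
    rw [List.mem_range] at hj
    simp only [decide_eq_true_eq, Bool.and_eq_true]
    have hlen : (cs.take (j+1)).length = j + 1 := by
      rw [List.length_take]; omega
    constructor
    · intro hrun
      rw [hLcast, Int.ofNat_le, le_runLen_iff, hlen] at hrun
      obtain ⟨hle, hall⟩ := hrun
      rw [List.drop_take] at hall
      have he1 : j + 1 - Ln = j - (Ln - 1) := by omega
      have he2 : j + 1 - (j + 1 - Ln) = Ln := by omega
      rw [he2, he1] at hall
      exact ⟨by omega, hall⟩
    · rintro ⟨hd, hall⟩
      rw [hLcast, Int.ofNat_le, le_runLen_iff, hlen, List.drop_take]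
      have he1 : j + 1 - Ln = j - (Ln - 1) := by omega
      have he2 : j + 1 - (j + 1 - Ln) = Ln := by omega
      rw [he2, he1]
      exact ⟨by omega, hall⟩
  rw [hstep,
    countP_range_shift (fun k => ((cs.drop k).take Ln).all (pEq gender)) cs.length (Ln - 1)]
  rfl

-- A's loop as a count over Nat indices
lemma inARow_eq_countP (s : String) (seq : Int) (gender : String) :
    inARow s seq gender
      = ((List.range ((s.toList.length : Int) - seq).toNat).countP
          (fun (k : Nat) => (PySem.List.slice s.toList (some (k : Int)) (some ((k : Int) + seq))).all (pEq gender)) : Int) := by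
  unfold inARow
  rw [PySem.List.foldl_if_add_one, PySem.List.pyRange_one, List.countP_map, Int.zero_add]
  have hM : ((s.toList.length : Int) - seq - 0).toNat = ((s.toList.length : Int) - seq).toNat := by
    omega
  rw [hM]
  congr 1
  refine List.countP_congr (fun k _ => ?_)
  simp [pEq, Function.comp]

-- A with positive seq: all iterated slices are full windows of length seq
lemma inARow_eval_pos (s : String) (seq : Int) (gender : String) (h : 0 < seq) :
    inARow s seq gender
      = (countW (pEq gender) s.toList seq.toNat (s.toList.length - seq.toNat) : Int) := by
  rw [inARow_eq_countP]
  have hM : ((s.toList.length : Int) - seq).toNat = s.toList.length - seq.toNat := by omega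
  rw [hM]
  unfold countW
  congr 1
  refine List.countP_congr (fun k _ => ?_)
  have hseq : seq = (seq.toNat : Int) := by omega
  conv_lhs => rw [hseq, PySem.List.slice_natCast_add]

-- the last-window predicate as it appears in D_
lemma lastWindow_eq (cs : List Char) (Ln : Nat) (hle : Ln ≤ cs.length) :
    (cs.drop (cs.length - Ln)).take Ln = cs.drop (cs.length - Ln) := by
  apply List.take_of_length_le
  rw [List.length_drop]
  omega

-- difference between B's and A's window ranges
lemma countW_split (p : Char → Bool) (cs : List Char) (Ln : Nat) (h1 : 1 ≤ Ln) :
    (countW p cs Ln (cs.length - (Ln - 1)) : Int)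
      = (countW p cs Ln (cs.length - Ln) : Int)
        + (if Ln ≤ cs.length ∧ ((cs.drop (cs.length - Ln)).take Ln).all p then 1 else 0) := by
  by_cases hle : Ln ≤ cs.length
  · have hsucc : cs.length - (Ln - 1) = (cs.length - Ln) + 1 := by omega
    unfold countW
    rw [hsucc, List.range_succ, List.countP_append, List.countP_cons, List.countP_nil]
    by_cases hw : ((cs.drop (cs.length - Ln)).take Ln).all p
    · rw [if_pos (And.intro hle hw)]
      simp [hw]
    · have hcond : ¬(Ln ≤ cs.length ∧ ((cs.drop (cs.length - Ln)).take Ln).all p = true) :=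
        fun hc => hw hc.2
      rw [if_neg hcond]
      simp [hw]
  · have h0 : cs.length - (Ln - 1) = cs.length - Ln := by omega
    rw [h0, if_neg (by tauto)]
    ring

-- ===== VERDICT (by name: the statements are the Claim_ definitions above) =====
theorem inARow_spec : Claim_unchanged_inARow := by
  intro s seq gender _hdom hpre hnD
  unfold Pre_inARow at hpre
  rw [inARow_eval_pos s seq gender (by omega), alt_eval s seq gender hpre,
    countW_split (pEq gender) s.toList seq.toNat (by omega)]
  rw [if_neg ?_]
  · ring
  · rintro ⟨hle, hall⟩
    apply hnD
    unfold D_inARow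
    refine ⟨hpre, by omega, ?_⟩
    rw [← lastWindow_eq s.toList seq.toNat hle]
    exact hall

theorem inARow_changed : Claim_changed_inARow := by
  unfold Claim_changed_inARow; decide

theorem inARow_tight : Claim_exact_inARow := by
  intro s seq gender _hdom hpre hD
  unfold Pre_inARow at hpre
  obtain ⟨_, hle, hall⟩ := hD
  have hw : ((s.toList.drop (s.toList.length - seq.toNat)).take seq.toNat).all (pEq gender) = true := by
    rw [lastWindow_eq s.toList seq.toNat (by omega)]
    exact hall
  rw [inARow_eval_pos s seq gender (by omega), alt_eval s seq gender hpre,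
    countW_split (pEq gender) s.toList seq.toNat (by omega),
    if_pos (And.intro (by omega : seq.toNat ≤ s.toList.length) hw)]
  omega
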